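-- pv_equiv track=rewrite | github.com/jv199768/LeetCode-PyBites-PythonMorsels-OtherProgrammingChallenges | match_multiple_strings.py | contains_only_vowels
-- ===== SOURCE A (Python) =====
-- def contains_only_vowels(your_string):
--     your_string = your_string.lower()
--     vowels = set("aeiou")
--     s = set({})
--     for char in your_string:
--         if char in vowels:
--             s.add(char)
--         else:
--             pass
--     if len(s) == len(vowels):
--         return True
--     else:
--         return False
-- ===== SOURCE B (Python) =====
-- def contains_only_vowels(your_string):
--     lowered = your_string.lower()
--     return all(vowel in lowered for vowel in "aeiou")
-- ===== Notes on version B (the rewrite author's own statement) =====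
-- stated objective: idiomatic
-- what changed: Instead of one pass over the characters accumulating a found-set and comparing its size to 5, B lowercases once and asks, for each of the five vowels, whether it occurs in the string, short-circuiting with all().
import Mathlib
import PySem

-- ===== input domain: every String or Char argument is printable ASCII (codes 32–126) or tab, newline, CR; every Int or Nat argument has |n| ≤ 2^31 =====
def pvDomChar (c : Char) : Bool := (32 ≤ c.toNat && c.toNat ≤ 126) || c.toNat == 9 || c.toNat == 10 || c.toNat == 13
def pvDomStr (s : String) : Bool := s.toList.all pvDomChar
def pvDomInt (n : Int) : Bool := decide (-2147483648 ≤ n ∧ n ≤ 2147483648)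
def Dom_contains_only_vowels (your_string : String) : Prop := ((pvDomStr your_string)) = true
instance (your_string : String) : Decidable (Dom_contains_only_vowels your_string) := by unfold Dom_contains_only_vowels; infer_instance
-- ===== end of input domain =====

-- B lowercases once and checks each of the five vowels for membership with all(),
-- instead of A's single pass accumulating a found-set and comparing its size (objective: idiomatic).


-- ===== PORT A =====
def contains_only_vowels (your_string : String) : Bool :=
  let lowered := PySem.Chars.lower your_string.toList
  let vowels : PySem.Set Char := PySem.Set.ofList "aeiou".toList
  let s : PySem.Set Char := lowered.foldl
    (fun s c => if PySem.Set.contains vowels c then PySem.Set.add s c else s)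
    PySem.Set.empty
  if PySem.Set.len s = PySem.Set.len vowels then true else false

-- ===== PORT B =====
def contains_only_vowels_alt (your_string : String) : Bool :=
  let lowered := PySem.Chars.lower your_string.toList
  "aeiou".toList.all (fun vowel => PySem.Chars.isIn [vowel] lowered)

-- ===== PRECONDITION & SPEC =====
def Spec_contains_only_vowels (your_string : String) (out : Bool) : Prop := out = contains_only_vowels_alt your_string
instance (your_string : String) (out : Bool) : Decidable (Spec_contains_only_vowels your_string out) := by unfold Spec_contains_only_vowels; infer_instance

-- ===== CLAIM (what is proved, stated in full; the proofs are below) =====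
def Claim_equal_contains_only_vowels : Prop := ∀ (your_string : String), Dom_contains_only_vowels your_string → Spec_contains_only_vowels your_string (contains_only_vowels your_string)

-- ===== LEMMAS AND PROOFS =====

-- A's loop (add each char passing the test) is the fold of Set.add over the filtered list.
theorem pv_fold_if_add (p : Char → Bool) (L : List Char) (s0 : PySem.Set Char) :
    L.foldl (fun s c => if p c then PySem.Set.add s c else s) s0
      = (L.filter p).foldl PySem.Set.add s0 := by
  induction L generalizing s0 with
  | nil => rfl
  | cons c L ih =>
    by_cases h : p c = true <;> simp [h, ih]

-- A's found-set has all five vowels iff every vowel occurs in the lowered string.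
theorem pv_len_iff (L : List Char) :
    (PySem.Set.ofList (L.filter
        (fun c => PySem.Set.contains (PySem.Set.ofList "aeiou".toList) c))).length = 5
      ↔ ∀ v ∈ "aeiou".toList, v ∈ L := by
  set V : List Char := "aeiou".toList with hV
  set S : PySem.Set Char := PySem.Set.ofList (L.filter
      (fun c => PySem.Set.contains (PySem.Set.ofList V) c)) with hS
  have hmem : ∀ x, x ∈ S ↔ x ∈ L ∧ x ∈ V := by
    intro x
    simp [hS, PySem.Set.mem_ofList, List.mem_filter,
      PySem.Set.mem_ofList]
  have hsub : S ⊆ V := fun x hx => ((hmem x).1 hx).2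
  have hnodupS : S.Nodup := PySem.Set.nodup_ofList _
  have hVlen : V.length = 5 := by decide
  constructor
  · intro hlen v hv
    have hsp : List.Subperm S V := List.subperm_of_subset hnodupS hsub
    have hperm : List.Perm S V :=
      List.Subperm.perm_of_length_le hsp (by rw [hVlen, hlen])
    exact ((hmem v).1 (hperm.mem_iff.mpr hv)).1
  · intro hall
    have hVsub : V ⊆ S := fun v hv => (hmem v).2 ⟨hall v hv, hv⟩
    have hVnodup : V.Nodup := by decide
    have h1 : S.length ≤ V.length :=
      (List.subperm_of_subset hnodupS hsub).length_le
    have h2 : V.length ≤ S.length :=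
      (List.subperm_of_subset hVnodup hVsub).length_le
    omega

-- ===== VERDICT (by name: the statement is the Claim_ definition above) =====
theorem contains_only_vowels_spec : Claim_equal_contains_only_vowels := by
  intro str _
  unfold Spec_contains_only_vowels contains_only_vowels contains_only_vowels_alt
  set L : List Char := PySem.Chars.lower str.toList with hL
  simp only [PySem.Set.len, PySem.Set.empty]
  simp only [pv_fold_if_add, ← PySem.Set.ofList_eq_foldl]
  have hB : ("aeiou".toList.all (fun v => PySem.Chars.isIn [v] L)) = true
      ↔ ∀ v ∈ "aeiou".toList, v ∈ L := by
    simp only [List.all_eq_true]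
    constructor
    · intro h v hv
      exact (List.singleton_infix_iff v L).1
        ((PySem.Chars.isIn_iff_infix [v] L).1 (h v hv))
    · intro h v hv
      exact (PySem.Chars.isIn_iff_infix [v] L).2
        ((List.singleton_infix_iff v L).2 (h v hv))
  have hVlen : (PySem.Set.ofList "aeiou".toList : List Char).length = 5 := by decide
  by_cases hP : ∀ v ∈ "aeiou".toList, v ∈ L
  · have hS5 := (pv_len_iff L).2 hP
    rw [hB.2 hP, hS5, hVlen]
    simp
  · have hBf : ("aeiou".toList.all (fun v => PySem.Chars.isIn [v] L)) = false := by
      rcases Bool.eq_false_or_eq_true ("aeiou".toList.all (fun v => PySem.Chars.isIn [v] L)) with h | h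
      · exact absurd (hB.1 h) hP
      · exact h
    have hA : ¬ (PySem.Set.ofList (L.filter
        (fun c => PySem.Set.contains (PySem.Set.ofList "aeiou".toList) c))).length = 5 :=
      fun h => hP ((pv_len_iff L).1 h)
    have hne : ¬ ((((PySem.Set.ofList (L.filter
        (fun c => PySem.Set.contains (PySem.Set.ofList "aeiou".toList) c))).length : Nat) : Int)
        = (((5:Nat)) : Int)) := by exact_mod_cast hA
    rw [hBf, hVlen, if_neg hne]
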